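-- pv_equiv track=rewrite | github.com/eulahwu917/ruppert-tradingbot | environments/demo/scripts/migrate_module_taxonomy.py | reclassify
-- ===== SOURCE A (Python) =====
-- def reclassify(record: dict) -> dict | None:
--     """
--     Returns updated record if module needs to change, else None (no-op).
--     Idempotent: new module names are already correct — returns None if module
--     already matches a new taxonomy value.
--     """
--     old_module = record.get('module', '')
--     ticker = (record.get('ticker') or '').upper()
--
--     # ── Already migrated ────────────────────────────────────────────────────
--     FINAL_MODULES = {
--         'weather_band', 'weather_threshold',
--         'crypto_dir_15m_btc', 'crypto_dir_15m_eth', 'crypto_dir_15m_sol',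
--         'crypto_dir_15m_xrp', 'crypto_dir_15m_doge',
--         'crypto_threshold_daily_btc', 'crypto_threshold_daily_eth',
--         'crypto_band_daily_btc', 'crypto_band_daily_eth',
--         'crypto_band_daily_sol', 'crypto_band_daily_xrp', 'crypto_band_daily_doge',
--         'econ_cpi', 'econ_unemployment', 'econ_fed_rate', 'econ_recession',
--         'geo', 'manual', 'other',
--     }
--     if old_module in FINAL_MODULES:
--         return None  # already migrated, skip
--
--     # ── weather → weather_band / weather_threshold ──────────────────────────
--     if old_module == 'weather':
--         if '-T' in ticker:
--             new_module = 'weather_threshold'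
--         else:
--             new_module = 'weather_band'  # -B type (default)
--         updated = dict(record)
--         updated['module'] = new_module
--         return updated
--
--     # ── crypto → crypto_band_daily_* (formerly crypto_1h_band) ─────────────
--     if old_module in ('crypto', 'crypto_1h_band'):
--         if 'ETH' in ticker:
--             new_module = 'crypto_band_daily_eth'
--         else:
--             new_module = 'crypto_band_daily_btc'  # default
--         updated = dict(record)
--         updated['module'] = new_module
--         return updated
--
--     # ── crypto_15m / crypto_15m_dir → crypto_dir_15m_* ──────────────────────
--     if old_module in ('crypto_15m', 'crypto_15m_dir'):
--         if 'ETH' in ticker: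
--             new_module = 'crypto_dir_15m_eth'
--         elif 'SOL' in ticker:
--             new_module = 'crypto_dir_15m_sol'
--         elif 'XRP' in ticker:
--             new_module = 'crypto_dir_15m_xrp'
--         elif 'DOGE' in ticker:
--             new_module = 'crypto_dir_15m_doge'
--         else:
--             new_module = 'crypto_dir_15m_btc'  # default
--         updated = dict(record)
--         updated['module'] = new_module
--         return updated
--
--     # ── crypto_1d / crypto_1h_dir → crypto_threshold_daily_* ────────────────
--     if old_module in ('crypto_1d', 'crypto_1h_dir'):
--         if 'ETH' in ticker:
--             new_module = 'crypto_threshold_daily_eth'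
--         else:
--             new_module = 'crypto_threshold_daily_btc'  # default
--         updated = dict(record)
--         updated['module'] = new_module
--         return updated
--
--     # ── fed → econ_fed_rate ──────────────────────────────────────────────────
--     if old_module == 'fed':
--         updated = dict(record)
--         updated['module'] = 'econ_fed_rate'
--         return updated
--
--     # ── econ → subcategory ───────────────────────────────────────────────────
--     if old_module == 'econ':
--         if ticker.startswith('KXCPI'):
--             new_module = 'econ_cpi'
--         elif any(ticker.startswith(p) for p in ('KXJOBLESSCLAIMS', 'KXECONSTATU3', 'KXUE')):
--             new_module = 'econ_unemployment'
--         elif ticker.startswith('KXWRECSS'):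
--             new_module = 'econ_recession'
--         else:
--             new_module = 'econ_cpi'  # fallback (same as classify_module default)
--         updated = dict(record)
--         updated['module'] = new_module
--         return updated
--
--     return None  # no mapping found — leave unchanged
-- ===== SOURCE B (Python) =====
-- # Declarative rule table interpreted by one generic first-match loop.
-- # Each rule: (source module, test kind, pattern, new module); 'sub' = substring of
-- # ticker, 'pre' = ticker prefix, 'any' = always matches (the default row).
-- # Modules with no row (final taxonomy names, unknowns) fall through to None.
-- RULES = [
--     ('weather',        'sub', '-T',              'weather_threshold'),
--     ('weather',        'any', '',                'weather_band'),
--     ('crypto',         'sub', 'ETH',             'crypto_band_daily_eth'),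
--     ('crypto',         'any', '',                'crypto_band_daily_btc'),
--     ('crypto_1h_band', 'sub', 'ETH',             'crypto_band_daily_eth'),
--     ('crypto_1h_band', 'any', '',                'crypto_band_daily_btc'),
--     ('crypto_15m',     'sub', 'ETH',             'crypto_dir_15m_eth'),
--     ('crypto_15m',     'sub', 'SOL',             'crypto_dir_15m_sol'),
--     ('crypto_15m',     'sub', 'XRP',             'crypto_dir_15m_xrp'),
--     ('crypto_15m',     'sub', 'DOGE',            'crypto_dir_15m_doge'),
--     ('crypto_15m',     'any', '',                'crypto_dir_15m_btc'),
--     ('crypto_15m_dir', 'sub', 'ETH',             'crypto_dir_15m_eth'),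
--     ('crypto_15m_dir', 'sub', 'SOL',             'crypto_dir_15m_sol'),
--     ('crypto_15m_dir', 'sub', 'XRP',             'crypto_dir_15m_xrp'),
--     ('crypto_15m_dir', 'sub', 'DOGE',            'crypto_dir_15m_doge'),
--     ('crypto_15m_dir', 'any', '',                'crypto_dir_15m_btc'),
--     ('crypto_1d',      'sub', 'ETH',             'crypto_threshold_daily_eth'),
--     ('crypto_1d',      'any', '',                'crypto_threshold_daily_btc'),
--     ('crypto_1h_dir',  'sub', 'ETH',             'crypto_threshold_daily_eth'),
--     ('crypto_1h_dir',  'any', '',                'crypto_threshold_daily_btc'),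
--     ('fed',            'any', '',                'econ_fed_rate'),
--     ('econ',           'pre', 'KXCPI',           'econ_cpi'),
--     ('econ',           'pre', 'KXJOBLESSCLAIMS', 'econ_unemployment'),
--     ('econ',           'pre', 'KXECONSTATU3',    'econ_unemployment'),
--     ('econ',           'pre', 'KXUE',            'econ_unemployment'),
--     ('econ',           'pre', 'KXWRECSS',        'econ_recession'),
--     ('econ',           'any', '',                'econ_cpi'),
-- ]
--
--
-- def reclassify(record: dict) -> dict | None:
--     old_module = record.get('module', '')
--     ticker = (record.get('ticker') or '').upper()
--     for mod, kind, pattern, new_module in RULES: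
--         if mod != old_module:
--             continue
--         if kind == 'sub' and pattern not in ticker:
--             continue
--         if kind == 'pre' and not ticker.startswith(pattern):
--             continue
--         updated = dict(record)
--         updated['module'] = new_module
--         return updated
--     return None
-- ===== Notes on version B (the rewrite author's own statement) =====
-- stated objective: alternative
-- what changed: Replaces the hard-coded if-ladder (with its explicit FINAL_MODULES set and duplicated copy-return blocks) by a declarative ordered rule table (module, test-kind, pattern, new-module) interpreted by one generic first-match scan loop; final/unknown modules simply have no rows and fall through to None.
import Mathlib
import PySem

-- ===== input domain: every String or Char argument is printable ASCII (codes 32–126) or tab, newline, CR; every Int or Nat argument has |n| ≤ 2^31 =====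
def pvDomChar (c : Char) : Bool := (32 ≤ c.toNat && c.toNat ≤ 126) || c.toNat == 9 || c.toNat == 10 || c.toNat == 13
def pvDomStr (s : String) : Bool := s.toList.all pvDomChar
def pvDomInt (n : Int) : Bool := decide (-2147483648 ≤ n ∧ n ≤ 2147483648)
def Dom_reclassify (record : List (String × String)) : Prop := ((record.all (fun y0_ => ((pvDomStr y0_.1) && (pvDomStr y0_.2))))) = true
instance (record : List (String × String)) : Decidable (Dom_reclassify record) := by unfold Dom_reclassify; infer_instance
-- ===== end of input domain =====

-- B replaces A's if-ladder by a declarative ordered rule table (module, test kind, pattern,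
-- new module) interpreted by one generic first-match scan (objective: alternative; same cost).


-- ===== PORT A =====
-- Python set literal FINAL_MODULES
def pvFinalModules : PySem.Set String := PySem.Set.ofList
  ["weather_band", "weather_threshold",
   "crypto_dir_15m_btc", "crypto_dir_15m_eth", "crypto_dir_15m_sol",
   "crypto_dir_15m_xrp", "crypto_dir_15m_doge",
   "crypto_threshold_daily_btc", "crypto_threshold_daily_eth",
   "crypto_band_daily_btc", "crypto_band_daily_eth",
   "crypto_band_daily_sol", "crypto_band_daily_xrp", "crypto_band_daily_doge",
   "econ_cpi", "econ_unemployment", "econ_fed_rate", "econ_recession",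
   "geo", "manual", "other"]

def reclassify (record : List (String × String)) : Option (List (String × String)) :=
  let d := PySem.Dict.mk record
  let old_module := d.getD "module" ""
  -- (record.get('ticker') or '').upper(): values are strings, so None never occurs; '' or '' = ''
  let ticker := PySem.Str.upper (d.getD "ticker" "")
  if pvFinalModules.contains old_module then none
  else if old_module == "weather" then
    let new_module := if PySem.Str.isIn "-T" ticker then "weather_threshold" else "weather_band"
    some ((d.insert "module" new_module).items)
  else if old_module == "crypto" || old_module == "crypto_1h_band" then
    let new_module := if PySem.Str.isIn "ETH" ticker then "crypto_band_daily_eth" else "crypto_band_daily_btc"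
    some ((d.insert "module" new_module).items)
  else if old_module == "crypto_15m" || old_module == "crypto_15m_dir" then
    let new_module :=
      if PySem.Str.isIn "ETH" ticker then "crypto_dir_15m_eth"
      else if PySem.Str.isIn "SOL" ticker then "crypto_dir_15m_sol"
      else if PySem.Str.isIn "XRP" ticker then "crypto_dir_15m_xrp"
      else if PySem.Str.isIn "DOGE" ticker then "crypto_dir_15m_doge"
      else "crypto_dir_15m_btc"
    some ((d.insert "module" new_module).items)
  else if old_module == "crypto_1d" || old_module == "crypto_1h_dir" then
    let new_module := if PySem.Str.isIn "ETH" ticker then "crypto_threshold_daily_eth" else "crypto_threshold_daily_btc"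
    some ((d.insert "module" new_module).items)
  else if old_module == "fed" then
    some ((d.insert "module" "econ_fed_rate").items)
  else if old_module == "econ" then
    let new_module :=
      if PySem.Str.startswith ticker "KXCPI" then "econ_cpi"
      else if ["KXJOBLESSCLAIMS", "KXECONSTATU3", "KXUE"].any (fun p => PySem.Str.startswith ticker p) then "econ_unemployment"
      else if PySem.Str.startswith ticker "KXWRECSS" then "econ_recession"
      else "econ_cpi"
    some ((d.insert "module" new_module).items)
  else none

-- ===== PORT B =====
-- the rule table of Source B: (source module, test kind, pattern, new module)
def pvRules : List (String × String × String × String) :=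
  [("weather",        "sub", "-T",              "weather_threshold"),
   ("weather",        "any", "",                "weather_band"),
   ("crypto",         "sub", "ETH",             "crypto_band_daily_eth"),
   ("crypto",         "any", "",                "crypto_band_daily_btc"),
   ("crypto_1h_band", "sub", "ETH",             "crypto_band_daily_eth"),
   ("crypto_1h_band", "any", "",                "crypto_band_daily_btc"),
   ("crypto_15m",     "sub", "ETH",             "crypto_dir_15m_eth"),
   ("crypto_15m",     "sub", "SOL",             "crypto_dir_15m_sol"),
   ("crypto_15m",     "sub", "XRP",             "crypto_dir_15m_xrp"),
   ("crypto_15m",     "sub", "DOGE",            "crypto_dir_15m_doge"),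
   ("crypto_15m",     "any", "",                "crypto_dir_15m_btc"),
   ("crypto_15m_dir", "sub", "ETH",             "crypto_dir_15m_eth"),
   ("crypto_15m_dir", "sub", "SOL",             "crypto_dir_15m_sol"),
   ("crypto_15m_dir", "sub", "XRP",             "crypto_dir_15m_xrp"),
   ("crypto_15m_dir", "sub", "DOGE",            "crypto_dir_15m_doge"),
   ("crypto_15m_dir", "any", "",                "crypto_dir_15m_btc"),
   ("crypto_1d",      "sub", "ETH",             "crypto_threshold_daily_eth"),
   ("crypto_1d",      "any", "",                "crypto_threshold_daily_btc"),
   ("crypto_1h_dir",  "sub", "ETH",             "crypto_threshold_daily_eth"),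
   ("crypto_1h_dir",  "any", "",                "crypto_threshold_daily_btc"),
   ("fed",            "any", "",                "econ_fed_rate"),
   ("econ",           "pre", "KXCPI",           "econ_cpi"),
   ("econ",           "pre", "KXJOBLESSCLAIMS", "econ_unemployment"),
   ("econ",           "pre", "KXECONSTATU3",    "econ_unemployment"),
   ("econ",           "pre", "KXUE",            "econ_unemployment"),
   ("econ",           "pre", "KXWRECSS",        "econ_recession"),
   ("econ",           "any", "",                "econ_cpi")]

-- the generic first-match loop of Source B (continue = recurse on the tail)
def pvScan (rules : List (String × String × String × String)) (old_module ticker : String) :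
    Option String :=
  match rules with
  | [] => none
  | (m, kind, pat, new) :: rest =>
    if m ≠ old_module then pvScan rest old_module ticker
    else if kind = "sub" ∧ ¬ PySem.Str.isIn pat ticker then pvScan rest old_module ticker
    else if kind = "pre" ∧ ¬ PySem.Str.startswith ticker pat then pvScan rest old_module ticker
    else some new

def reclassify_alt (record : List (String × String)) : Option (List (String × String)) :=
  let d := PySem.Dict.mk record
  let old_module := d.getD "module" ""
  let ticker := PySem.Str.upper (d.getD "ticker" "")
  match pvScan pvRules old_module ticker with
  | none => none
  | some new_module => some ((d.insert "module" new_module).items)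

-- ===== PRECONDITION & SPEC =====
def Spec_reclassify (record : List (String × String)) (out : Option (List (String × String))) : Prop := out = reclassify_alt record
instance (record : List (String × String)) (out : Option (List (String × String))) : Decidable (Spec_reclassify record out) := by unfold Spec_reclassify; infer_instance

-- ===== CLAIM (what is proved, stated in full; the proofs are below) =====
def Claim_equal_reclassify : Prop := ∀ (record : List (String × String)), Dom_reclassify record → Spec_reclassify record (reclassify record)

-- ===== LEMMAS AND PROOFS =====

theorem pv_final_absent :
    "weather" ∉ pvFinalModules ∧
    "crypto" ∉ pvFinalModules ∧
    "crypto_1h_band" ∉ pvFinalModules ∧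
    "crypto_15m" ∉ pvFinalModules ∧
    "crypto_15m_dir" ∉ pvFinalModules ∧
    "crypto_1d" ∉ pvFinalModules ∧
    "crypto_1h_dir" ∉ pvFinalModules ∧
    "fed" ∉ pvFinalModules ∧
    "econ" ∉ pvFinalModules := by decide

-- ===== VERDICT (by name: the statement is the Claim_ definition above) =====
theorem reclassify_spec : Claim_equal_reclassify := by
  intro record _
  unfold Spec_reclassify
  show reclassify record = reclassify_alt record
  unfold reclassify reclassify_alt
  dsimp only
  generalize PySem.Dict.mk record = d
  generalize (d.getD "module" "") = m
  generalize PySem.Str.upper (d.getD "ticker" "") = t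
  by_cases h1 : m = "weather"
  · simp [h1, pvRules, pvScan, pv_final_absent.1]
    split_ifs <;> simp_all
  by_cases h2 : m = "crypto"
  · simp [h2, pvRules, pvScan, pv_final_absent.2.1]
    split_ifs <;> simp_all
  by_cases h3 : m = "crypto_1h_band"
  · simp [h3, pvRules, pvScan, pv_final_absent.2.2.1]
    split_ifs <;> simp_all
  by_cases h4 : m = "crypto_15m"
  · simp [h4, pvRules, pvScan, pv_final_absent.2.2.2.1]
    split_ifs <;> simp_all
  by_cases h5 : m = "crypto_15m_dir"
  · simp [h5, pvRules, pvScan, pv_final_absent.2.2.2.2.1]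
    split_ifs <;> simp_all
  by_cases h6 : m = "crypto_1d"
  · simp [h6, pvRules, pvScan, pv_final_absent.2.2.2.2.2.1]
    split_ifs <;> simp_all
  by_cases h7 : m = "crypto_1h_dir"
  · simp [h7, pvRules, pvScan, pv_final_absent.2.2.2.2.2.2.1]
    split_ifs <;> simp_all
  by_cases h8 : m = "fed"
  · simp [h8, pvRules, pvScan, pv_final_absent.2.2.2.2.2.2.2.1]
  by_cases h9 : m = "econ"
  · simp [h9, pvRules, pvScan, pv_final_absent.2.2.2.2.2.2.2.2]
    split_ifs <;> simp_all
  · simp [pvRules, pvScan, h1, h2, h3, h4, h5, h6, h7, h8, h9,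
      Ne.symm h1, Ne.symm h2, Ne.symm h3, Ne.symm h4, Ne.symm h5,
      Ne.symm h6, Ne.symm h7, Ne.symm h8, Ne.symm h9]
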